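-- pv_equiv track=rewrite | github.com/AP-MI-2021/lab-4-mariapirv | main.py | cati_div_proprii
-- ===== SOURCE A (Python) =====
-- def cati_div_proprii(n):
--     '''
--     calculeaza numarul de divizori proprii a unui numar
--     :param n: numar intreg
--     :return: numarul de divizori proprii a numarului
--     '''
--     if n < 0:
--         return 0
--     else:
--         catiDiv = 0
--         for div in range(2,n):
--             if n % div == 0:
--                 catiDiv = catiDiv + 1
--         return catiDiv
-- ===== SOURCE B (Python) =====
-- def cati_div_proprii(n):
--     '''
--     calculeaza numarul de divizori proprii a unui numar
--     :param n: numar intreg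
--     :return: numarul de divizori proprii a numarului
--     '''
--     cnt = 0
--     d = 2
--     while d * d <= n:
--         if n % d == 0:
--             cnt += 1 if d * d == n else 2
--         d += 1
--     return cnt
-- ===== Notes on version B (the rewrite author's own statement) =====
-- stated objective: faster
-- what changed: Replaces A's linear scan of every candidate divisor in range(2,n) by a loop over trial divisors d with d*d <= n, counting each divisor pair (d, n//d) at once (once when d*d == n).
import Mathlib
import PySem

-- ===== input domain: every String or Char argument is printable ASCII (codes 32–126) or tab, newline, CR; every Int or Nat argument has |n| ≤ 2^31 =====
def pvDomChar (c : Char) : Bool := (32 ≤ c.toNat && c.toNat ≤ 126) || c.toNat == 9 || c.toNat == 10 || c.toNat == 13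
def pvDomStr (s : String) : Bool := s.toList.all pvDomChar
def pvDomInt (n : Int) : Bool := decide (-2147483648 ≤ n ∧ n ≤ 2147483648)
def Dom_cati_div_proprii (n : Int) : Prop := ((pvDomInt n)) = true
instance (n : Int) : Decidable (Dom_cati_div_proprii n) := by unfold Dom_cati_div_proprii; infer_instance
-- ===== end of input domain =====

-- B replaces A's O(n) scan of all candidate divisors by the O(√n) divisor-pair count (d and n/d for d ≤ √n); same value on every int.

-- ===== PORT A =====
def cati_div_proprii (n : Int) : Int :=
  if n < 0 then 0
  else
    (PySem.List.pyRange 2 n 1).foldl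
      (fun catiDiv div => if PySem.Int.mod n div = 0 then catiDiv + 1 else catiDiv) 0

-- ===== PORT B =====
-- while d * d <= n: count the pair (d, n // d), once only when d * d == n
def altLoop (n d cnt : Int) : Int :=
  if _h : d * d ≤ n then
    altLoop n (d + 1)
      (if PySem.Int.mod n d = 0 then (if d * d = n then cnt + 1 else cnt + 2) else cnt)
  else cnt
termination_by (n + 2 - d).toNat
decreasing_by
  have hd : d ≤ d * d := by nlinarith [mul_self_nonneg d, mul_self_nonneg (d - 1)]
  omega

def cati_div_proprii_alt (n : Int) : Int := altLoop n 2 0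

-- ===== PRECONDITION & SPEC =====
def Spec_cati_div_proprii (n : Int) (out : Int) : Prop := out = cati_div_proprii_alt n
instance (n : Int) (out : Int) : Decidable (Spec_cati_div_proprii n out) := by unfold Spec_cati_div_proprii; infer_instance

-- ===== CLAIM (what is proved, stated in full; the proofs are below) =====
def Claim_equal_cati_div_proprii : Prop := ∀ (n : Int), Dom_cati_div_proprii n → Spec_cati_div_proprii n (cati_div_proprii n)

-- ===== LEMMAS AND PROOFS =====

-- count over a Python range as a Finset cardinality
theorem countP_pyRange_eq_card (a b : Int) (p : Int → Bool) :
    ((PySem.List.pyRange a b 1).countP p : Int)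
      = ((Finset.Ico a b).filter (fun x => p x = true)).card := by
  rcases lt_or_ge a b with h | h
  · rw [PySem.List.pyRange_one_cons h, List.countP_cons,
      ← Finset.insert_Ico_add_one_left_eq_Ico h, Finset.filter_insert]
    have ih := countP_pyRange_eq_card (a + 1) b p
    have hmem : a ∉ (Finset.Ico (a + 1) b).filter (fun x => p x = true) := by
      simp [Finset.mem_Ico]
    by_cases hp : p a = true
    · simp [hp, ih, Finset.card_insert_of_notMem hmem]
    · simp [hp, ih]
  · rw [PySem.List.pyRange_one_eq_nil h, Finset.Ico_eq_empty (by omega)]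
    simp
termination_by (b - a).toNat
decreasing_by omega

-- a proper divisor is at most half of n
theorem twice_le_of_dvd (n x : Int) (_hn : 0 ≤ n) (hx : 2 ≤ x) (hxn : x < n)
    (hd : x ∣ n) : 2 * x ≤ n := by
  obtain ⟨q, hq⟩ := hd
  have hq2 : 2 ≤ q := by nlinarith
  nlinarith

-- the set still to be counted by altLoop when the trial divisor has reached d
noncomputable def restSet (n d : Int) : Finset Int :=
  (Finset.Ico (2:Int) n).filter (fun x => PySem.Int.mod n x = 0 ∧ d ≤ x ∧ d * x ≤ n)

theorem restSet_step (n d : Int) (_hn : 0 ≤ n) (hd : 2 ≤ d) (hdd : d * d ≤ n) :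
    ((restSet n d).card : Int)
      = (restSet n (d + 1)).card
        + (if PySem.Int.mod n d = 0 then (if d * d = n then 1 else 2) else 0) := by
  have hsub : restSet n (d + 1) ⊆ restSet n d := by
    intro x hx
    simp only [restSet, Finset.mem_filter, Finset.mem_Ico] at hx ⊢
    obtain ⟨⟨h2x, hxn⟩, hm, hdx, hmul⟩ := hx
    exact ⟨⟨h2x, hxn⟩, hm, by omega, by nlinarith⟩
  have hcard := Finset.card_sdiff_add_card_eq_card hsub
  have hdn : d < n := by nlinarith
  by_cases hm : PySem.Int.mod n d = 0
  · have hdvd : d ∣ n := (PySem.Int.mod_eq_zero_iff_dvd n d).mp hm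
    by_cases hsq : d * d = n
    · -- exactly the divisor d disappears
      have hdiff : restSet n d \ restSet n (d + 1) = {d} := by
        ext x
        simp only [restSet, Finset.mem_sdiff, Finset.mem_filter, Finset.mem_Ico,
          Finset.mem_singleton]
        constructor
        · rintro ⟨⟨⟨h2x, hxn⟩, hmx, hdx, hmul⟩, hnot⟩
          by_contra hne
          apply hnot
          have hdvdx : x ∣ n := (PySem.Int.mod_eq_zero_iff_dvd n x).mp hmx
          obtain ⟨q, hq⟩ := hdvdx
          have hx0 : 0 < x := by omega
          have hqd : d ≤ q := by nlinarith
          have hqd' : d + 1 ≤ q := by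
            rcases eq_or_lt_of_le hqd with h | h
            · exfalso; apply hne; nlinarith
            · omega
          exact ⟨⟨h2x, hxn⟩, hmx, by omega, by nlinarith⟩
        · rintro rfl
          refine ⟨⟨⟨by omega, hdn⟩, hm, le_refl _, hdd⟩, ?_⟩
          rintro ⟨_, _, hdx, _⟩; omega
      rw [if_pos hm, if_pos hsq]
      rw [hdiff] at hcard
      simp only [Finset.card_singleton] at hcard
      omega
    · -- the two paired divisors d and n / d disappear
      obtain ⟨q, hq⟩ := hdvd
      have hd0 : 0 < d := by omega
      have hdq : d < q := by
        rcases lt_or_ge d q with h | h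
        · exact h
        · exfalso; apply hsq
          have h1 : d * q ≤ d * d := by nlinarith
          linarith
      have hqn : q < n := by nlinarith
      have hqm : PySem.Int.mod n q = 0 :=
        (PySem.Int.mod_eq_zero_iff_dvd n q).mpr ⟨d, by rw [hq]; ring⟩
      have hdiff : restSet n d \ restSet n (d + 1) = {d, q} := by
        ext x
        simp only [restSet, Finset.mem_sdiff, Finset.mem_filter, Finset.mem_Ico,
          Finset.mem_insert, Finset.mem_singleton]
        constructor
        · rintro ⟨⟨⟨h2x, hxn⟩, hmx, hdx, hmul⟩, hnot⟩
          by_cases hxd : x = d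
          · exact Or.inl hxd
          · right
            have hdvdx : x ∣ n := (PySem.Int.mod_eq_zero_iff_dvd n x).mp hmx
            obtain ⟨r, hr⟩ := hdvdx
            have hx0 : 0 < x := by omega
            have hrd : d ≤ r := by nlinarith
            rcases eq_or_lt_of_le hrd with h | h
            · -- n = d * x, so x = q
              nlinarith
            · exfalso; exact hnot ⟨⟨h2x, hxn⟩, hmx, by omega, by nlinarith⟩
        · rintro (rfl | rfl)
          · refine ⟨⟨⟨by omega, hdn⟩, hm, le_refl _, hdd⟩, ?_⟩
            rintro ⟨_, _, hdx, _⟩; omega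
          · refine ⟨⟨⟨by omega, hqn⟩, hqm, by omega, by nlinarith⟩, ?_⟩
            rintro ⟨_, _, _, hmul⟩; nlinarith
      rw [if_pos hm, if_neg hsq]
      rw [hdiff] at hcard
      have hdq' : d ∉ ({q} : Finset Int) := by
        simp only [Finset.mem_singleton]; omega
      rw [Finset.card_insert_of_notMem hdq', Finset.card_singleton] at hcard
      omega
  · -- no divisor disappears
    have hdiff : restSet n d \ restSet n (d + 1) = ∅ := by
      ext x
      simp only [restSet, Finset.mem_sdiff, Finset.mem_filter, Finset.mem_Ico,
        Finset.notMem_empty, iff_false]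
      rintro ⟨⟨⟨h2x, hxn⟩, hmx, hdx, hmul⟩, hnot⟩
      apply hnot
      have hdvdx : x ∣ n := (PySem.Int.mod_eq_zero_iff_dvd n x).mp hmx
      obtain ⟨r, hr⟩ := hdvdx
      have hx0 : 0 < x := by omega
      have hxd : x ≠ d := by
        rintro rfl
        exact hm ((PySem.Int.mod_eq_zero_iff_dvd n x).mpr ⟨r, hr⟩)
      have hrd : d ≤ r := by nlinarith
      have hrd' : d + 1 ≤ r := by
        rcases eq_or_lt_of_le hrd with h | h
        · exfalso
          apply hm
          exact (PySem.Int.mod_eq_zero_iff_dvd n d).mpr ⟨x, by nlinarith⟩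
        · omega
      exact ⟨⟨h2x, hxn⟩, hmx, by omega, by nlinarith⟩
    rw [if_neg hm]
    rw [hdiff] at hcard
    simp only [Finset.card_empty] at hcard
    omega

theorem altLoop_eq_card (n d cnt : Int) (hn : 0 ≤ n) (hd : 2 ≤ d) :
    altLoop n d cnt = cnt + ((restSet n d).card : Int) := by
  rw [altLoop]
  by_cases h : d * d ≤ n
  · rw [dif_pos h]
    have ih := altLoop_eq_card n (d + 1)
      (if PySem.Int.mod n d = 0 then (if d * d = n then cnt + 1 else cnt + 2) else cnt)
      hn (by omega)
    rw [ih, restSet_step n d hn hd h]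
    split_ifs <;> omega
  · rw [dif_neg h]
    have hempty : restSet n d = ∅ := by
      ext x
      simp only [restSet, Finset.mem_filter, Finset.mem_Ico, Finset.notMem_empty, iff_false]
      rintro ⟨⟨h2x, hxn⟩, _, hdx, hmul⟩
      nlinarith
    rw [hempty]
    simp
termination_by (n + 2 - d).toNat
decreasing_by
  have hd2 : d ≤ d * d := by nlinarith [mul_self_nonneg d, mul_self_nonneg (d - 1)]
  omega

theorem restSet_two (n : Int) (hn : 0 ≤ n) :
    restSet n 2 = (Finset.Ico (2:Int) n).filter (fun x => PySem.Int.mod n x = 0) := by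
  apply Finset.filter_congr
  intro x hx
  simp only [Finset.mem_Ico] at hx
  constructor
  · rintro ⟨hm, _, _⟩; exact hm
  · intro hm
    refine ⟨hm, hx.1, ?_⟩
    exact twice_le_of_dvd n x hn hx.1 hx.2 ((PySem.Int.mod_eq_zero_iff_dvd n x).mp hm)

-- ===== VERDICT (by name: the statement is the Claim_ definition above) =====
theorem cati_div_proprii_spec : Claim_equal_cati_div_proprii := by
  intro n _
  unfold Spec_cati_div_proprii cati_div_proprii cati_div_proprii_alt
  by_cases hn : n < 0
  · rw [if_pos hn, altLoop, dif_neg (by nlinarith)]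
  · rw [if_neg hn]
    have hn' : (0:Int) ≤ n := by omega
    have hbody :
        (fun (catiDiv div : Int) => if PySem.Int.mod n div = 0 then catiDiv + 1 else catiDiv)
          = (fun catiDiv div =>
              if (fun d => decide (PySem.Int.mod n d = 0)) div = true then catiDiv + 1 else catiDiv) := by
      funext c d; simp
    rw [hbody, PySem.List.foldl_count_if, countP_pyRange_eq_card,
      altLoop_eq_card n 2 0 hn' (by norm_num), restSet_two n hn']
    simp
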